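-- pv_equiv track=rewrite | github.com/acsamaro/bmt | indexer.py | calculate_max_frequencies
-- ===== SOURCE A (Python) =====
-- def calculate_max_frequencies(freq_per_tokens):
--     max_freq_per_doc = {}
--     for _, doc_freq in freq_per_tokens.items():
--         for doc_id, freq in doc_freq.items():
--             if doc_id not in max_freq_per_doc:
--                 max_freq_per_doc[doc_id] = freq
--             else:
--                 max_freq_per_doc[doc_id] = max(max_freq_per_doc[doc_id], freq)
--     return max_freq_per_doc
-- ===== SOURCE B (Python) =====
-- def calculate_max_frequencies(freq_per_tokens):
--     # gather all frequencies per doc_id, then reduce with max in a second pass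
--     grouped = {}
--     for doc_freq in freq_per_tokens.values():
--         for doc_id, freq in doc_freq.items():
--             grouped[doc_id] = grouped.get(doc_id, []) + [freq]
--     return {doc_id: max(freqs) for doc_id, freqs in grouped.items()}
-- ===== Notes on version B (the rewrite author's own statement) =====
-- stated objective: alternative
-- what changed: Replaces A's single running-max update per entry with a gather-then-reduce shape: first build doc_id -> list of all frequencies, then take max of each list in a second pass.
import Mathlib
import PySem

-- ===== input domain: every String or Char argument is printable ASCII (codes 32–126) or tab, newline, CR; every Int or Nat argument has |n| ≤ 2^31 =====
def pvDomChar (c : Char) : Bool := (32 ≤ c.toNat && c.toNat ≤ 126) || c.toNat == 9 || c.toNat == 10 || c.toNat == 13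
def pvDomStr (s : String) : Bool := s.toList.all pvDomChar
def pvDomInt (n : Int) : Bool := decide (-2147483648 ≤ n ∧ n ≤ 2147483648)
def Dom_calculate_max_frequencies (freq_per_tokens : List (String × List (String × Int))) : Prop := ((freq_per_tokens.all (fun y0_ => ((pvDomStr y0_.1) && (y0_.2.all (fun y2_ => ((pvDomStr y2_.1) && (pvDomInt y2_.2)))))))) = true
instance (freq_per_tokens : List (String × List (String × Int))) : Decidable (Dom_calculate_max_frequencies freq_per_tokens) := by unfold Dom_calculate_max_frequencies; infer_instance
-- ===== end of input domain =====

-- B replaces A's running-max update per entry with a gather-all-frequencies-then-reduce-with-max shape (same cost, different decomposition).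


-- ===== PORT A =====
-- loop body of A: if doc_id not in max_freq_per_doc: m[doc_id] = freq else: m[doc_id] = max(m[doc_id], freq)
def pvStepA (m : PySem.Dict String Int) (df : String × Int) : PySem.Dict String Int :=
  match m.get? df.1 with
  | none => m.insert df.1 df.2
  | some v => m.insert df.1 (max v df.2)

def calculate_max_frequencies (freq_per_tokens : List (String × List (String × Int))) : List (String × Int) :=
  (freq_per_tokens.foldl
    (fun max_freq_per_doc kv => kv.2.foldl pvStepA max_freq_per_doc)
    PySem.Dict.empty).items

-- ===== PORT B =====
-- max(freqs) for a nonempty list of ints (B only calls it on nonempty lists; [] is an unreachable guard)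
def pyMaxInt (l : List Int) : Int :=
  match l with
  | [] => 0
  | h :: t => t.foldl max h

-- loop body of B: grouped[doc_id] = grouped.get(doc_id, []) + [freq]
def pvStepB (g : PySem.Dict String (List Int)) (df : String × Int) : PySem.Dict String (List Int) :=
  g.modify df.1 [] (· ++ [df.2])

def calculate_max_frequencies_alt (freq_per_tokens : List (String × List (String × Int))) : List (String × Int) :=
  let grouped : PySem.Dict String (List Int) :=
    freq_per_tokens.foldl (fun grouped kv => kv.2.foldl pvStepB grouped) PySem.Dict.empty
  grouped.items.map (fun p => (p.1, pyMaxInt p.2))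

-- ===== PRECONDITION & SPEC =====
def Spec_calculate_max_frequencies (freq_per_tokens : List (String × List (String × Int))) (out : List (String × Int)) : Prop := out = calculate_max_frequencies_alt freq_per_tokens
instance (freq_per_tokens : List (String × List (String × Int))) (out : List (String × Int)) : Decidable (Spec_calculate_max_frequencies freq_per_tokens out) := by unfold Spec_calculate_max_frequencies; infer_instance

-- ===== CLAIM (what is proved, stated in full; the proofs are below) =====
def Claim_equal_calculate_max_frequencies : Prop := ∀ (freq_per_tokens : List (String × List (String × Int))), Dom_calculate_max_frequencies freq_per_tokens → Spec_calculate_max_frequencies freq_per_tokens (calculate_max_frequencies freq_per_tokens)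

-- ===== LEMMAS AND PROOFS =====

-- abstraction: a grouped dict projects to A's running-max dict by taking the max of each list
def pvF : String × List Int → String × Int := fun p => (p.1, pyMaxInt p.2)

theorem pyMaxInt_append (l : List Int) (hl : l ≠ []) (v : Int) :
    pyMaxInt (l ++ [v]) = max (pyMaxInt l) v := by
  cases l with
  | nil => exact absurd rfl hl
  | cons h t => simp [pyMaxInt, List.foldl_append]

theorem contains_map_pvF (g : PySem.Dict String (List Int)) (k : String) :
    (PySem.Dict.mk (g.items.map pvF)).contains k = g.contains k := by
  simp only [PySem.Dict.contains, List.any_map]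
  congr 1

theorem get?_map_pvF (g : PySem.Dict String (List Int)) (k : String) :
    (PySem.Dict.mk (g.items.map pvF)).get? k = (g.get? k).map (fun l => pyMaxInt l) := by
  simp only [PySem.Dict.get?, List.find?_map]
  have : ((fun p : String × Int => p.1 == k) ∘ pvF) = (fun p : String × List Int => p.1 == k) := by
    funext p; rfl
  rw [this]
  generalize List.find? (fun p : String × List Int => p.1 == k) g.items = o
  cases o <;> rfl

theorem pvStep_eq (g : PySem.Dict String (List Int))
    (hne : ∀ p ∈ g.items, p.2 ≠ []) (df : String × Int) :
    pvStepA (PySem.Dict.mk (g.items.map pvF)) df = PySem.Dict.mk ((pvStepB g df).items.map pvF) := by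
  unfold pvStepA pvStepB
  rw [get?_map_pvF]
  by_cases hc : g.contains df.1 = true
  · -- key present: replace in place on both sides
    obtain ⟨l, hl⟩ : ∃ l, g.get? df.1 = some l := by
      have := PySem.Dict.contains_eq_isSome_get? g df.1
      rw [hc] at this
      exact Option.isSome_iff_exists.mp this.symm
    have hlne : l ≠ [] := hne _ (PySem.Dict.mem_items_of_get?_eq_some g hl)
    rw [hl]
    simp only [Option.map_some]
    rw [PySem.Dict.modify, PySem.Dict.getD_of_get?_eq_some g [] hl]
    rw [PySem.Dict.insert, PySem.Dict.insert]
    rw [contains_map_pvF, hc]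
    simp only [if_true, List.map_map]
    congr 1
    congr 1
    funext p
    by_cases hp : p.1 == df.1
    · simp [hp, Function.comp, pvF, pyMaxInt_append l hlne]
    · simp [hp, Function.comp, pvF]
  · -- key absent: both sides append a fresh entry
    have hn : g.get? df.1 = none := by
      have := PySem.Dict.contains_eq_isSome_get? g df.1
      simp only [Bool.not_eq_true] at hc
      rw [hc] at this
      exact Option.not_isSome_iff_eq_none.mp (by rw [← this]; simp)
    rw [hn]
    simp only [Option.map_none]
    rw [PySem.Dict.modify, PySem.Dict.getD_of_get?_eq_none g [] hn]
    rw [PySem.Dict.insert, PySem.Dict.insert]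
    rw [contains_map_pvF]
    simp only [Bool.not_eq_true] at hc
    rw [hc]
    simp [pvF, pyMaxInt]

theorem pvStepB_ne (g : PySem.Dict String (List Int))
    (hne : ∀ p ∈ g.items, p.2 ≠ []) (df : String × Int) :
    ∀ p ∈ (pvStepB g df).items, p.2 ≠ [] := by
  intro p hp
  unfold pvStepB PySem.Dict.modify PySem.Dict.insert at hp
  split at hp
  · simp only [List.mem_map] at hp
    obtain ⟨q, hq, hpq⟩ := hp
    by_cases h : q.1 == df.1
    · rw [if_pos h] at hpq
      subst hpq; simp
    · rw [if_neg h] at hpq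
      subst hpq; exact hne _ hq
  · simp only [List.mem_append, List.mem_singleton] at hp
    rcases hp with hp | hp
    · exact hne _ hp
    · subst hp; simp

theorem pvInner (l : List (String × Int)) :
    ∀ (g : PySem.Dict String (List Int)), (∀ p ∈ g.items, p.2 ≠ []) →
      l.foldl pvStepA (PySem.Dict.mk (g.items.map pvF)) = PySem.Dict.mk ((l.foldl pvStepB g).items.map pvF)
      ∧ ∀ p ∈ (l.foldl pvStepB g).items, p.2 ≠ [] := by
  induction l with
  | nil => intro g hg; exact ⟨rfl, hg⟩
  | cons df t ih =>
    intro g hg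
    simp only [List.foldl_cons]
    rw [pvStep_eq g hg df]
    exact ih (pvStepB g df) (pvStepB_ne g hg df)

theorem pvOuter (fpt : List (String × List (String × Int))) :
    ∀ (g : PySem.Dict String (List Int)), (∀ p ∈ g.items, p.2 ≠ []) →
      fpt.foldl (fun m kv => kv.2.foldl pvStepA m) (PySem.Dict.mk (g.items.map pvF))
        = PySem.Dict.mk ((fpt.foldl (fun g kv => kv.2.foldl pvStepB g) g).items.map pvF)
      ∧ ∀ p ∈ (fpt.foldl (fun g kv => kv.2.foldl pvStepB g) g).items, p.2 ≠ [] := by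
  induction fpt with
  | nil => intro g hg; exact ⟨rfl, hg⟩
  | cons kv t ih =>
    intro g hg
    simp only [List.foldl_cons]
    obtain ⟨heq, hne⟩ := pvInner kv.2 g hg
    rw [heq]
    exact ih _ hne

-- ===== VERDICT (by name: the statement is the Claim_ definition above) =====
theorem calculate_max_frequencies_spec : Claim_equal_calculate_max_frequencies := by
  intro fpt _
  unfold Spec_calculate_max_frequencies calculate_max_frequencies calculate_max_frequencies_alt
  have h := (pvOuter fpt (PySem.Dict.mk []) (by intro p hp; simp at hp)).1
  simp only [List.map_nil] at h
  show (fpt.foldl (fun m kv => kv.2.foldl pvStepA m) PySem.Dict.empty).items = _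
  have hempty : (PySem.Dict.empty : PySem.Dict String Int) = PySem.Dict.mk [] := rfl
  have hemptyB : (PySem.Dict.empty : PySem.Dict String (List Int)) = PySem.Dict.mk [] := rfl
  rw [hempty, hemptyB, h]
  rfl
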